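-- pv_equiv track=rewrite | github.com/scottkuma/AdventOfCode2018 | Day13/13.py | get_clean_track
-- ===== SOURCE A (Python) =====
-- def get_clean_track(track):
--     clean_track = []
--     for r in track:
--         r = r.replace("<", "-")
--         r = r.replace(">", "-")
--         r = r.replace("^", "|")
--         r = r.replace("v", "|")
--         clean_track.append(r)
--     return(clean_track)
-- ===== SOURCE B (Python) =====
-- _CARTS = "<>^v"
--
--
-- def _next_cart(r, pos):
--     """Index of the first cart character at or after pos, or -1 if none."""
--     j = -1
--     for ch in _CARTS:
--         k = r.find(ch, pos)
--         if k != -1 and (j == -1 or k < j):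
--             j = k
--     return j
--
--
-- def _clean_row(r):
--     """Find-and-splice: jump from cart to cart, copying clean segments in bulk."""
--     pieces = []
--     pos = 0
--     while True:
--         j = _next_cart(r, pos)
--         if j == -1:
--             pieces.append(r[pos:])
--             return "".join(pieces)
--         pieces.append(r[pos:j])
--         pieces.append("-" if r[j] in "<>" else "|")
--         pos = j + 1
--
--
-- def get_clean_track(track):
--     return [_clean_row(r) for r in track]
-- ===== Notes on version B (the rewrite author's own statement) =====
-- stated objective: alternative
-- what changed: Replaces A's four sequential whole-string replace passes (each rebuilding the row) with a find-and-splice scan: repeatedly locate the next cart character via str.find, copy the untouched segment in bulk as a slice, emit the replacement track char, and join the pieces once.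
import Mathlib
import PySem

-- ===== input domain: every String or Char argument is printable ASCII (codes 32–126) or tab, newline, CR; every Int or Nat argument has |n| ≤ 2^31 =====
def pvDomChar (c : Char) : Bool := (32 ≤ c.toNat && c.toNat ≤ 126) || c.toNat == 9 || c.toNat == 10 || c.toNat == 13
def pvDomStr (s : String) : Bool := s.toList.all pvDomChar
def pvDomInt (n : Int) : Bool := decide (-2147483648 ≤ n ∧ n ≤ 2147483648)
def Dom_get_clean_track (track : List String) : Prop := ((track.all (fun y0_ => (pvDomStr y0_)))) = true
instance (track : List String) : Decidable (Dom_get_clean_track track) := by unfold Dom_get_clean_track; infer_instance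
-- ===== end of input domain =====

-- B cleans each row by a find-and-splice scan (jump to the next cart char via find,
-- copy the untouched segment in bulk, emit the track char) instead of A's four
-- sequential whole-string replace passes; objective: alternative.


-- ===== PORT A =====
def get_clean_track (track : List String) : List String :=
  track.foldl (fun clean_track r =>
    let r1 := PySem.Str.replace r "<" "-"
    let r2 := PySem.Str.replace r1 ">" "-"
    let r3 := PySem.Str.replace r2 "^" "|"
    let r4 := PySem.Str.replace r3 "v" "|"
    clean_track ++ [r4]) []

-- ===== PORT B =====
-- the module-level _CARTS string of Source B, as its character list
def pvCarts : List Char := ['<', '>', '^', 'v']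

-- _next_cart(r, pos): loop over the four cart chars, keep the smallest non-(-1) find result
def pvNextCart (r : List Char) (pos : Nat) : Int :=
  pvCarts.foldl (fun j ch =>
    let k := PySem.Chars.findFrom r [ch] (pos : Int) none
    if k ≠ -1 ∧ (j = -1 ∨ k < j) then k else j) (-1)

-- the while-loop of _clean_row; fuel only makes the loop total (it always suffices:
-- each iteration advances pos past the cart char found)
def pvCleanRowGo (r : List Char) (fuel : Nat) (pos : Nat) (pieces : List (List Char)) : List Char :=
  match fuel with
  | 0 => pieces.flatten
  | fuel + 1 =>
    let j := pvNextCart r pos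
    if j = -1 then
      (pieces ++ [PySem.List.slice r (some (pos : Int)) none]).flatten
    else
      let c := r.getD j.toNat ' '   -- r[j]; an index returned by find is always in range
      pvCleanRowGo r fuel (j.toNat + 1)
        (pieces ++ [PySem.List.slice r (some (pos : Int)) (some j),
                    if ['<', '>'].contains c then ['-'] else ['|']])

def pvCleanRow (r : String) : String :=
  String.ofList (pvCleanRowGo r.toList (r.toList.length + 1) 0 [])

def get_clean_track_alt (track : List String) : List String :=
  track.map pvCleanRow

-- ===== PRECONDITION & SPEC =====
def Spec_get_clean_track (track : List String) (out : List String) : Prop := out = get_clean_track_alt track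
instance (track : List String) (out : List String) : Decidable (Spec_get_clean_track track out) := by unfold Spec_get_clean_track; infer_instance

-- ===== CLAIM (what is proved, stated in full; the proofs are below) =====
def Claim_equal_get_clean_track : Prop := ∀ (track : List String), Dom_get_clean_track track → Spec_get_clean_track track (get_clean_track track)

-- ===== LEMMAS AND PROOFS =====

-- the per-character substitution both programs realize
def pvSubst (c : Char) : Char :=
  if c = '<' then '-' else if c = '>' then '-' else if c = '^' then '|' else if c = 'v' then '|' else c

-- ---- A side: replace with single-char pattern/replacement is a per-character map ----
lemma replace_go_single (o n : Char) (fuel : Nat) :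
    ∀ (l acc : List Char), l.length ≤ fuel →
      PySem.Chars.replace.go [o] [n] fuel l acc
        = acc.reverse ++ l.map (fun c => if c = o then n else c) := by
  induction fuel with
  | zero =>
      intro l acc h
      have : l = [] := List.eq_nil_of_length_eq_zero (Nat.le_zero.mp h)
      subst this
      simp [PySem.Chars.replace.go]
  | succ fuel ih =>
      intro l acc h
      cases l with
      | nil => simp [PySem.Chars.replace.go]
      | cons c t =>
          simp only [PySem.Chars.replace.go, List.isPrefixOf, List.map_cons]
          have hlen : t.length ≤ fuel := Nat.le_of_succ_le_succ (by simpa using h)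
          by_cases hc : c = o
          · subst hc
            simp only [beq_self_eq_true, Bool.true_and, if_true,
              List.length_cons, List.length_nil, List.drop_succ_cons, List.drop_zero,
              List.reverse_singleton, List.singleton_append]
            rw [ih t (n :: acc) hlen]
            simp
          · have hoc : (o == c) = false := beq_eq_false_iff_ne.mpr (Ne.symm hc)
            simp only [hoc, Bool.false_and, Bool.false_eq_true, not_false_eq_true, if_neg]
            rw [ih t (c :: acc) hlen]
            simp [hc]

lemma replace_single (s : List Char) (o n : Char) :
    PySem.Chars.replace s [o] [n] = s.map (fun c => if c = o then n else c) := by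
  unfold PySem.Chars.replace
  simp only [List.isEmpty_cons, if_neg, Bool.false_eq_true, not_false_eq_true]
  simpa using replace_go_single o n s.length s [] (le_refl _)

-- A's four sequential replaces compute the per-character substitution
lemma a_row_eq (r : String) :
    PySem.Str.replace (PySem.Str.replace (PySem.Str.replace (PySem.Str.replace r "<" "-") ">" "-") "^" "|") "v" "|"
      = String.ofList (r.toList.map pvSubst) := by
  apply String.toList_injective
  simp only [PySem.Str.toList_replace, String.toList_ofList]
  have h1 : ("<" : String).toList = ['<'] := rfl
  have h2 : (">" : String).toList = ['>'] := rfl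
  have h3 : ("^" : String).toList = ['^'] := rfl
  have h4 : ("v" : String).toList = ['v'] := rfl
  have h5 : ("-" : String).toList = ['-'] := rfl
  have h6 : ("|" : String).toList = ['|'] := rfl
  rw [h1, h2, h3, h4, h5, h6, replace_single, replace_single, replace_single, replace_single]
  simp only [List.map_map]
  apply List.map_congr_left
  intro c _
  simp only [Function.comp, pvSubst]
  by_cases e1 : c = '<'
  · subst e1; decide
  by_cases e2 : c = '>'
  · subst e2; decide
  by_cases e3 : c = '^'
  · subst e3; decide
  by_cases e4 : c = 'v'
  · subst e4; decide
  · simp [e1, e2, e3, e4]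

-- ---- B side ----
-- single-character prefix = head
lemma singleton_prefix_iff (ch : Char) (t : List Char) : [ch] <+: t ↔ t.head? = some ch := by
  cases t with
  | nil => simp
  | cons a t' =>
      simp only [List.cons_prefix_cons, List.head?_cons, Option.some.injEq]
      constructor
      · rintro ⟨h, _⟩; exact h.symm
      · intro h; exact ⟨h.symm, List.nil_prefix⟩

lemma singleton_prefix_drop_iff (ch : Char) (r : List Char) (i : Nat) :
    [ch] <+: r.drop i ↔ r[i]? = some ch := by
  rw [singleton_prefix_iff, List.head?_drop]

-- invariant maintained by _next_cart's loop over the cart characters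
def pvIsNext (r : List Char) (pos : Nat) (cs : List Char) (j : Int) : Prop :=
  (j = -1 ∧ ∀ i, pos ≤ i → ∀ c ∈ cs, r[i]? ≠ some c) ∨
  (∃ jn : Nat, j = (jn : Int) ∧ pos ≤ jn ∧ jn < r.length ∧
    (∃ c ∈ cs, r[jn]? = some c) ∧ ∀ i, pos ≤ i → i < jn → ∀ c ∈ cs, r[i]? ≠ some c)

lemma pvIsNext_step (r : List Char) (pos : Nat) (hpos : pos ≤ r.length)
    (cs : List Char) (j : Int) (ch : Char) (h : pvIsNext r pos cs j) :
    pvIsNext r pos (cs ++ [ch])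
      (let k := PySem.Chars.findFrom r [ch] (pos : Int) none
       if k ≠ -1 ∧ (j = -1 ∨ k < j) then k else j) := by
  simp only []
  by_cases hkneg : PySem.Chars.findFrom r [ch] (pos : Int) none = -1
  · -- find failed: ch occurs nowhere at or after pos
    have hnoch : ∀ i, pos ≤ i → r[i]? ≠ some ch := by
      intro i hi hcontra
      have hnin : ¬ [ch] <:+: r.drop pos :=
        (PySem.Chars.findFrom_natCast_eq_neg_one_iff r [ch] pos hpos).mp hkneg
      apply hnin
      have hsuff : r.drop i <:+ r.drop pos := by
        have : r.drop i = (r.drop pos).drop (i - pos) := by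
          rw [List.drop_drop]; congr 1; omega
        rw [this]; exact List.drop_suffix _ _
      exact ((singleton_prefix_drop_iff ch r i).mpr hcontra).isInfix.trans hsuff.isInfix
    rw [if_neg (by simp [hkneg])]
    rcases h with ⟨hj, hnone⟩ | ⟨jn, hj, hpj, hjl, hmem, hbefore⟩
    · refine Or.inl ⟨hj, ?_⟩
      intro i hi c hc
      rcases List.mem_append.mp hc with hc | hc
      · exact hnone i hi c hc
      · simp only [List.mem_singleton] at hc; subst hc; exact hnoch i hi
    · refine Or.inr ⟨jn, hj, hpj, hjl, ?_, ?_⟩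
      · obtain ⟨c, hcs, hcv⟩ := hmem
        exact ⟨c, List.mem_append_left _ hcs, hcv⟩
      · intro i h1 h2 c hc
        rcases List.mem_append.mp hc with hc | hc
        · exact hbefore i h1 h2 c hc
        · simp only [List.mem_singleton] at hc; subst hc; exact hnoch i h1
  · -- find succeeded at index kn
    obtain ⟨hkk, hpref, hmin⟩ := PySem.Chars.findFrom_natCast_spec r [ch] pos hpos hkneg
    set k := PySem.Chars.findFrom r [ch] (pos : Int) none with hkdef
    have hk0 : 0 ≤ k := le_trans (by exact_mod_cast Nat.zero_le pos) hkk
    have hkeq : k = (k.toNat : Int) := (Int.toNat_of_nonneg hk0).symm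
    have hch : r[k.toNat]? = some ch := (singleton_prefix_drop_iff ch r k.toNat).mp hpref
    have hknlen : k.toNat < r.length := by
      obtain ⟨hlt, -⟩ := List.getElem?_eq_some_iff.mp hch; exact hlt
    have hposkn : pos ≤ k.toNat := by omega
    have hminI : ∀ i, pos ≤ i → i < k.toNat → r[i]? ≠ some ch := by
      intro i h1 h2 hc
      exact hmin i h1 h2 ((singleton_prefix_drop_iff ch r i).mpr hc)
    rcases h with ⟨hj, hnone⟩ | ⟨jn, hj, hpj, hjl, hmem, hbefore⟩
    · rw [if_pos ⟨hkneg, Or.inl hj⟩]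
      refine Or.inr ⟨k.toNat, hkeq, hposkn, hknlen, ⟨ch, by simp, hch⟩, ?_⟩
      intro i h1 h2 c hc
      rcases List.mem_append.mp hc with hc | hc
      · exact hnone i h1 c hc
      · simp only [List.mem_singleton] at hc; subst hc; exact hminI i h1 h2
    · have hjne : j ≠ -1 := by rw [hj]; omega
      by_cases hlt : k < j
      · rw [if_pos ⟨hkneg, Or.inr hlt⟩]
        refine Or.inr ⟨k.toNat, hkeq, hposkn, hknlen, ⟨ch, by simp, hch⟩, ?_⟩
        intro i h1 h2 c hc
        rcases List.mem_append.mp hc with hc | hc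
        · refine hbefore i h1 ?_ c hc
          have : (i : Int) < jn := by rw [← hj]; exact lt_of_lt_of_le (by omega) (le_of_lt hlt)
          omega
        · simp only [List.mem_singleton] at hc; subst hc; exact hminI i h1 h2
      · rw [if_neg (fun hcond => by rcases hcond.2 with hc | hc; exact hjne hc; exact hlt hc)]
        refine Or.inr ⟨jn, hj, hpj, hjl, ?_, ?_⟩
        · obtain ⟨c, hcs, hcv⟩ := hmem
          exact ⟨c, List.mem_append_left _ hcs, hcv⟩
        · intro i h1 h2 c hc
          rcases List.mem_append.mp hc with hc | hc
          · exact hbefore i h1 h2 c hc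
          · simp only [List.mem_singleton] at hc; subst hc
            refine hminI i h1 ?_
            have hjk : (jn : Int) ≤ k := by rw [← hj]; exact not_lt.mp hlt
            omega

lemma pvNextCart_spec (r : List Char) (pos : Nat) (hpos : pos ≤ r.length) :
    pvIsNext r pos pvCarts (pvNextCart r pos) := by
  have h0 : pvIsNext r pos [] (-1) := Or.inl ⟨rfl, by simp⟩
  have h1 := pvIsNext_step r pos hpos [] (-1) '<' h0
  have h2 := pvIsNext_step r pos hpos ['<'] _ '>' h1
  have h3 := pvIsNext_step r pos hpos ['<', '>'] _ '^' h2
  have h4 := pvIsNext_step r pos hpos ['<', '>', '^'] _ 'v' h3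
  exact h4

-- elements of a cart-free region are fixed by pvSubst
lemma map_subst_id (r : List Char) (pos b : Nat)
    (h : ∀ i, pos ≤ i → i < b → ∀ c ∈ pvCarts, r[i]? ≠ some c) :
    ((r.drop pos).take (b - pos)).map pvSubst = (r.drop pos).take (b - pos) := by
  conv_rhs => rw [← List.map_id ((r.drop pos).take (b - pos))]
  apply List.map_congr_left
  intro c hc
  obtain ⟨i, hi⟩ := List.mem_iff_getElem?.mp hc
  rw [List.getElem?_take] at hi
  by_cases hib : i < b - pos
  · rw [if_pos hib, List.getElem?_drop] at hi
    have hne : ∀ c' ∈ pvCarts, c ≠ c' := by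
      intro c' hc' he
      exact h (pos + i) (by omega) (by omega) c' hc' (he ▸ hi)
    have e1 : c ≠ '<' := hne '<' (by simp [pvCarts])
    have e2 : c ≠ '>' := hne '>' (by simp [pvCarts])
    have e3 : c ≠ '^' := hne '^' (by simp [pvCarts])
    have e4 : c ≠ 'v' := hne 'v' (by simp [pvCarts])
    simp [pvSubst, e1, e2, e3, e4]
  · rw [if_neg hib] at hi; exact absurd hi (by simp)

lemma map_subst_id_all (r : List Char) (pos : Nat)
    (h : ∀ i, pos ≤ i → ∀ c ∈ pvCarts, r[i]? ≠ some c) :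
    (r.drop pos).map pvSubst = r.drop pos := by
  have htake : (r.drop pos).take (r.length - pos) = r.drop pos :=
    List.take_of_length_le (by simp)
  rw [← htake, map_subst_id r pos r.length (fun i h1 _ => h i h1)]

-- the while loop computes the per-character substitution of the untouched suffix
lemma cleanGo_eq (r : List Char) :
    ∀ (fuel pos : Nat) (pieces : List (List Char)), pos ≤ r.length → r.length - pos < fuel →
      pvCleanRowGo r fuel pos pieces = pieces.flatten ++ (r.drop pos).map pvSubst := by
  intro fuel
  induction fuel with
  | zero => intro pos pieces _ h2; omega
  | succ fuel ih =>
      intro pos pieces hpos h2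
      rcases pvNextCart_spec r pos hpos with ⟨hj, hnone⟩ | ⟨jn, hj, hpj, hjl, hmem, hbefore⟩
      · simp only [pvCleanRowGo, hj, if_pos]
        rw [PySem.List.slice_from_natCast, List.flatten_append,
          map_subst_id_all r pos hnone]
        simp
      · have hjne : pvNextCart r pos ≠ -1 := by rw [hj]; omega
        simp only [pvCleanRowGo, hj, Int.toNat_natCast]
        obtain ⟨c0, hc0carts, hc0⟩ := hmem
        have hgd : r.getD jn ' ' = c0 := by
          rw [List.getD_eq_getElem?_getD, hc0]; rfl
        rw [hgd, ih (jn + 1) _ (by omega) (by omega)]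
        rw [PySem.List.slice_natCast]
        have hdecomp : r.drop pos = (r.drop pos).take (jn - pos) ++ c0 :: r.drop (jn + 1) := by
          conv_lhs => rw [← List.take_append_drop (jn - pos) (r.drop pos)]
          congr 1
          rw [List.drop_drop]
          have : pos + (jn - pos) = jn := by omega
          rw [this, List.drop_eq_getElem_cons hjl]
          congr 1
          have := List.getElem?_eq_some_iff.mp hc0
          obtain ⟨_, hv⟩ := this
          exact hv
        conv_rhs => rw [hdecomp]
        rw [List.map_append, List.map_cons,
          map_subst_id r pos jn (fun i h1 h2v => hbefore i h1 h2v)]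
        have hsub : [pvSubst c0] = (if ['<', '>'].contains c0 then ['-'] else ['|']) := by
          simp only [pvCarts, List.mem_cons, List.not_mem_nil, or_false] at hc0carts
          rcases hc0carts with h | h | h | h <;> subst h <;> decide
        simp only [List.flatten_append, List.flatten_cons, List.flatten_nil,
          List.append_nil, List.append_assoc]
        rw [← hsub]
        simp

lemma b_row_eq (r : String) : pvCleanRow r = String.ofList (r.toList.map pvSubst) := by
  unfold pvCleanRow
  rw [cleanGo_eq r.toList (r.toList.length + 1) 0 [] (Nat.zero_le _) (by omega)]
  simp

-- ===== VERDICT (by name: the statement is the Claim_ definition above) =====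
theorem get_clean_track_spec : Claim_equal_get_clean_track := by
  intro track _
  unfold Spec_get_clean_track get_clean_track get_clean_track_alt
  rw [PySem.List.foldl_append_singleton_eq_map]
  simp only [List.nil_append]
  exact List.map_congr_left (fun r _ => by rw [a_row_eq r, ← b_row_eq r])
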